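-- pv_equiv track=rewrite | github.com/recuraki/PythonJunkTest | atcoder/lib/maze.py | doTry
-- ===== SOURCE A (Python) =====
-- def doTry(l, k, canfloor=2):
--     # lの中で、連続するk個の"#"があるか？ただし、canfloor個までは"."が合っても良い O(N)
--     l = list(l)
--     if len(l) < k: return False
--     cnt = 0
--     for i in range(k):
--         if l[i] == "#": cnt += 1
--     if cnt >= (k - canfloor): return True
--     for i in range(k, len(l)): # 今から読み込むindex
--         if l[i] == "#": cnt += 1
--         if l[i-k] == "#": cnt -= 1
--         if cnt >= (k - canfloor): return True
--     return False
-- ===== SOURCE B (Python) =====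
-- def doTry(l, k, canfloor=2):
--     # prefix-sum re-implementation: pre[i] = number of '#' in l[:i];
--     # window l[i:i+k] qualifies iff pre[i+k] - pre[i] >= k - canfloor.
--     # A degenerate window (k <= 0) holds 0 '#' and qualifies iff 0 >= k - canfloor.
--     l = list(l)
--     n = len(l)
--     if n < k:
--         return False
--     if k <= 0:
--         return canfloor >= k
--     s = 0
--     pre = [0]
--     for c in l:
--         s += (c == "#")
--         pre.append(s)
--     return any(pre[i + k] - pre[i] >= k - canfloor for i in range(n - k + 1))
-- ===== Notes on version B (the rewrite author's own statement) =====
-- stated objective: alternative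
-- what changed: Replaces A's incremental sliding-window counter (init loop + per-step add/subtract with early return) by a prefix-sum table built in one pass, each window tested directly as pre[i+k]-pre[i]; degenerate windows (k<=0) are answered by the closed condition canfloor>=k.
-- outside the precondition, e.g. on doTry(['.', '#', '#'], -1, -2): A returns True, B returns False; on doTry(['#'], -1, -3): A raises IndexError, B returns False
import Mathlib
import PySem

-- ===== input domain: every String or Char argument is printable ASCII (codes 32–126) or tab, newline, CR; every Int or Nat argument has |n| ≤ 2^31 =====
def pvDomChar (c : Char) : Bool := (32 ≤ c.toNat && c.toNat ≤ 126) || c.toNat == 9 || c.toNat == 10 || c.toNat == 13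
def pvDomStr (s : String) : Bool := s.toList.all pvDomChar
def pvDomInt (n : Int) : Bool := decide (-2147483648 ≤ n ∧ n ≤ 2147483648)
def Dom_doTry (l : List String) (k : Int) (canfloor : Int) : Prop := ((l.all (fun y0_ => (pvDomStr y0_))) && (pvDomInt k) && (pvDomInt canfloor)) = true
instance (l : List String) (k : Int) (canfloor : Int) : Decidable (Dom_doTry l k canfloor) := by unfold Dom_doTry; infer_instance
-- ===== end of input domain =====

-- B replaces A's sliding-window counter by a one-pass prefix-sum table (same O(n) cost, different decomposition).

-- ===== PORT A =====
def doTry (l : List String) (k : Int) (canfloor : Int) : Bool :=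
  if (l.length : Int) < k then false
  else
    let cnt : Int := (PySem.List.pyRange 0 k 1).foldl
      (fun cnt i => if PySem.List.pyGetD l i "" = "#" then cnt + 1 else cnt) 0
    if cnt ≥ k - canfloor then true
    else
      ((PySem.List.pyRange k (l.length : Int) 1).foldl
        (fun s i =>
          let c1 := if PySem.List.pyGetD l i "" = "#" then s.1 + 1 else s.1
          let c2 := if PySem.List.pyGetD l (i - k) "" = "#" then c1 - 1 else c1
          (c2, s.2 || decide (c2 ≥ k - canfloor))) (cnt, false)).2

-- ===== PORT B =====
def doTry_alt (l : List String) (k : Int) (canfloor : Int) : Bool :=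
  if (l.length : Int) < k then false
  else if k ≤ 0 then decide (canfloor ≥ k)
  else
    let pre := (l.foldl (fun sp c =>
      let s' := sp.1 + (if c = "#" then (1 : Int) else 0)
      (s', sp.2 ++ [s'])) ((0 : Int), [(0 : Int)])).2
    (PySem.List.pyRange 0 ((l.length : Int) - k + 1) 1).any
      (fun i => decide (PySem.List.pyGetD pre (i + k) 0 - PySem.List.pyGetD pre i 0 ≥ k - canfloor))

-- ===== PRECONDITION & SPEC =====
-- Pre_ excludes only k < 0 with canfloor < k: there A's sliding loop reads l[i] and l[i-k]
-- with negative-index wraparound and raises IndexError on almost every input, returning a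
-- value only when a wrapped-around window accidentally reaches the threshold.
def Pre_doTry (l : List String) (k : Int) (canfloor : Int) : Prop := 0 ≤ k ∨ k ≤ canfloor
instance (l : List String) (k : Int) (canfloor : Int) : Decidable (Pre_doTry l k canfloor) := by unfold Pre_doTry; infer_instance
def pvWitness_doTry : List String × Int × Int := (["#", ".", "#"], 2, 1)
def Spec_doTry (l : List String) (k : Int) (canfloor : Int) (out : Bool) : Prop := out = doTry_alt l k canfloor
instance (l : List String) (k : Int) (canfloor : Int) (out : Bool) : Decidable (Spec_doTry l k canfloor out) := by unfold Spec_doTry; infer_instance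

-- ===== CLAIM (what is proved, stated in full; the proofs are below) =====
def Claim_equal_doTry : Prop := ∀ (l : List String) (k : Int) (canfloor : Int), Dom_doTry l k canfloor → Pre_doTry l k canfloor → Spec_doTry l k canfloor (doTry l k canfloor)

-- ===== LEMMAS AND PROOFS =====

-- number of '#' in the window l[j:j+K]
def hcnt (l : List String) (j K : Nat) : Nat := ((l.drop j).take K).countP (· == "#")

-- prefix counts split a window count off
lemma hcnt_split (l : List String) (j K : Nat) :
    (l.take (j + K)).countP (· == "#") = (l.take j).countP (· == "#") + hcnt l j K := by
  rw [List.take_add, List.countP_append]; rfl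

-- the slide identity behind A's add/subtract step
lemma hcnt_slide (l : List String) (j K : Nat) (h : j + K < l.length) :
    hcnt l j K + (if l.getD (j + K) "" = "#" then 1 else 0)
      = (if l.getD j "" = "#" then 1 else 0) + hcnt l (j + 1) K := by
  have h1 : hcnt l j (K + 1) = hcnt l j K + (if l.getD (j + K) "" = "#" then 1 else 0) := by
    unfold hcnt
    rw [List.take_succ]
    have : (l.drop j)[K]? = some l[j + K] := by
      rw [List.getElem?_drop]
      exact List.getElem?_eq_getElem (by omega)
    rw [this, List.countP_append, List.getD_eq_getElem l "" h]
    by_cases hc : l[j + K] = "#" <;> simp [hc, List.countP_cons]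
  have h2 : hcnt l j (K + 1) = (if l.getD j "" = "#" then 1 else 0) + hcnt l (j + 1) K := by
    unfold hcnt
    have hj : j < l.length := by omega
    rw [List.drop_eq_getElem_cons hj, List.take_succ_cons, List.countP_cons,
        List.getD_eq_getElem l "" hj]
    by_cases hc : l[j] = "#" <;> simp [hc, Nat.add_comm]
  omega

-- A's initialisation loop counts '#' in the first window
lemma loopA_init (l : List String) (K : Nat) (h : K ≤ l.length) :
    (PySem.List.pyRange 0 (K : Int) 1).foldl
      (fun cnt i => if PySem.List.pyGetD l i "" = "#" then cnt + 1 else cnt) (0 : Int)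
    = (hcnt l 0 K : Int) := by
  induction K with
  | zero => simp [PySem.List.pyRange_one_eq_nil, hcnt]
  | succ m ih =>
    have hm : m ≤ l.length := by omega
    rw [show ((m + 1 : Nat) : Int) = (m : Int) + 1 by push_cast; ring,
        PySem.List.pyRange_one_succ_right (by positivity), List.foldl_append, ih hm]
    unfold hcnt
    simp only [List.drop_zero, List.foldl_cons, List.foldl_nil, PySem.List.pyGetD_natCast]
    rw [List.take_succ]
    have hg : l[m]? = some l[m] := List.getElem?_eq_getElem (by omega)
    rw [hg, List.countP_append, List.getD_eq_getElem l "" (by omega)]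
    by_cases hc : l[m] = "#" <;>
      simp only [hc, if_pos, if_neg, Option.toList_some, List.countP_cons, List.countP_nil,
        if_true, reduceIte] <;>
      simp [hc] <;> omega

-- A's sliding loop reports whether any later window reaches the threshold t
lemma loopA_main (l : List String) (K : Nat) (t : Int) :
    ∀ (r j : Nat) (b : Bool), K + j + r = l.length →
    ((PySem.List.pyRange ((K : Int) + (j : Int)) (l.length : Int) 1).foldl
        (fun s i =>
          let c1 := if PySem.List.pyGetD l i "" = "#" then s.1 + 1 else s.1
          let c2 := if PySem.List.pyGetD l (i - (K : Int)) "" = "#" then c1 - 1 else c1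
          (c2, s.2 || decide (c2 ≥ t))) ((hcnt l j K : Int), b)).2
      = (b || (List.range r).any (fun d => decide ((hcnt l (j + 1 + d) K : Int) ≥ t))) := by
  intro r
  induction r with
  | zero =>
    intro j b hlen
    rw [PySem.List.pyRange_one_eq_nil (by push_cast; omega)]
    simp
  | succ m ih =>
    intro j b hlen
    rw [PySem.List.pyRange_one_cons (by push_cast; omega)]
    simp only [List.foldl_cons]
    rw [show (K : Int) + (j : Int) - (K : Int) = ((j : Nat) : Int) by ring]
    rw [show (K : Int) + (j : Int) = ((K + j : Nat) : Int) by push_cast; ring]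
    simp only [PySem.List.pyGetD_natCast]
    have hc2 :
        (if l.getD j "" = "#" then
            (if l.getD (K + j) "" = "#" then (hcnt l j K : Int) + 1 else (hcnt l j K : Int)) - 1
          else (if l.getD (K + j) "" = "#" then (hcnt l j K : Int) + 1 else (hcnt l j K : Int)))
          = (hcnt l (j + 1) K : Int) := by
      have hs := hcnt_slide l j K (by omega)
      rw [Nat.add_comm j K] at hs
      split_ifs at hs ⊢ <;> push_cast at hs ⊢ <;> omega
    rw [hc2]
    rw [show ((K + j : Nat) : Int) + 1 = (K : Int) + ((j + 1 : Nat) : Int) by push_cast; ring]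
    rw [ih (j + 1) (b || decide ((hcnt l (j + 1) K : Int) ≥ t)) (by omega)]
    rw [List.range_succ_eq_map]
    simp [List.any_cons, Bool.or_assoc, Function.comp_def, Nat.add_comm, Nat.add_assoc,
      Nat.add_left_comm]

-- B's prefix list, characterised: acc ++ running prefix counts
lemma preB (l : List String) : ∀ (s0 : Int) (acc0 : List Int),
    (l.foldl (fun sp c =>
      let s' := sp.1 + (if c = "#" then (1 : Int) else 0)
      (s', sp.2 ++ [s'])) (s0, acc0)).2
    = acc0 ++ (List.range l.length).map
        (fun i => s0 + ((l.take (i + 1)).countP (· == "#") : Int)) := by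
  induction l with
  | nil => intro s0 acc0; simp
  | cons c tl ih =>
    intro s0 acc0
    simp only [List.foldl_cons]
    rw [ih]
    rw [List.length_cons, List.range_succ_eq_map]
    simp [List.countP_cons, Function.comp_def, List.append_assoc]
    intro a _
    by_cases hc : c = "#" <;> simp [hc] <;> ring

-- the full pre table: pre[i] = count of '#' in l[:i], for i = 0..n
lemma preB_full (l : List String) :
    (l.foldl (fun sp c =>
      let s' := sp.1 + (if c = "#" then (1 : Int) else 0)
      (s', sp.2 ++ [s'])) ((0 : Int), [(0 : Int)])).2
    = (List.range (l.length + 1)).map (fun i => ((l.take i).countP (· == "#") : Int)) := by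
  rw [preB, List.range_succ_eq_map]
  simp [Function.comp_def]

theorem doTry_spec : Claim_equal_doTry := by
  intro l k canfloor _ hpre
  unfold Spec_doTry doTry doTry_alt
  by_cases hlen : (l.length : Int) < k
  · simp [hlen]
  · simp only [hlen, if_false]
    by_cases hk : k ≤ 0
    · -- degenerate window
      have hcnt0 : (PySem.List.pyRange 0 k 1).foldl
          (fun cnt i => if PySem.List.pyGetD l i "" = "#" then cnt + 1 else cnt) (0 : Int) = 0 := by
        rw [PySem.List.pyRange_one_eq_nil (by omega)]; rfl
      simp only [hk, if_true, hcnt0]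
      by_cases hth : (0 : Int) ≥ k - canfloor
      · simp [hth, ge_iff_le]; omega
      · -- then k = 0 (Pre_ rules out k < 0 with canfloor < k), and the loop keeps cnt = 0
        have hk0 : k = 0 := by
          rcases hpre with h | h <;> omega
        subst hk0
        simp only [hth, if_false, sub_zero]
        have hloop : ∀ (L : List Int) (b : Bool),
            (L.foldl (fun s i =>
              ((if PySem.List.pyGetD l i "" = "#" then
                  (if PySem.List.pyGetD l i "" = "#" then s.1 + 1 else s.1) - 1
                else if PySem.List.pyGetD l i "" = "#" then s.1 + 1 else s.1),
                s.2 || decide ((if PySem.List.pyGetD l i "" = "#" then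
                  (if PySem.List.pyGetD l i "" = "#" then s.1 + 1 else s.1) - 1
                else if PySem.List.pyGetD l i "" = "#" then s.1 + 1 else s.1) ≥ 0 - canfloor)))
              ((0 : Int), b)) = (0, b) := by
          intro L
          induction L with
          | nil => intro b; rfl
          | cons x tl ih =>
            intro b
            simp only [List.foldl_cons]
            have hstep : (if PySem.List.pyGetD l x "" = "#" then
                (if PySem.List.pyGetD l x "" = "#" then (0 : Int) + 1 else 0) - 1
              else if PySem.List.pyGetD l x "" = "#" then (0 : Int) + 1 else 0) = 0 := by
              by_cases hc : PySem.List.pyGetD l x "" = "#" <;> simp [hc]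
            rw [hstep]
            have hd : decide ((0 : Int) ≥ 0 - canfloor) = false := by
              simp only [decide_eq_false_iff_not]; omega
            rw [hd, Bool.or_false, ih]
        rw [hloop]
        simp; omega
    · -- main case: 0 < k ≤ n
      push_neg at hk hlen
      simp only [show ¬ k ≤ 0 from by omega, if_false]
      set K := k.toNat with hK
      have hkK : k = (K : Int) := by omega
      have hKn : K ≤ l.length := by omega
      set t := k - canfloor with ht
      rw [hkK, loopA_init l K hKn, preB_full]
      have hbound : (l.length : Int) - (K : Int) + 1 = ((l.length - K + 1 : Nat) : Int) := by
        push_cast; omega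
      rw [hbound, PySem.List.pyRange_zero_natCast, List.any_map]
      simp only [Function.comp_def]
      have hBany : (List.range (l.length - K + 1)).any
          (fun j => decide (PySem.List.pyGetD
              ((List.range (l.length + 1)).map (fun i => ((l.take i).countP (· == "#") : Int)))
              (((j : Nat) : Int) + (K : Int)) 0
            - PySem.List.pyGetD
              ((List.range (l.length + 1)).map (fun i => ((l.take i).countP (· == "#") : Int)))
              ((j : Nat) : Int) 0 ≥ t))
          = (List.range (l.length - K + 1)).any (fun j => decide ((hcnt l j K : Int) ≥ t)) := by
        apply PySem.List.any_congr_mem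
        intro j hj
        rw [List.mem_range] at hj
        rw [show ((j : Nat) : Int) + (K : Int) = ((j + K : Nat) : Int) by push_cast; ring]
        simp only [PySem.List.pyGetD_natCast]
        rw [List.getD_eq_getElem _ _ (by simp; omega), List.getD_eq_getElem _ _ (by simp; omega)]
        simp only [List.getElem_map, List.getElem_range]
        rw [hcnt_split l j K, decide_eq_decide]
        push_cast
        omega
      rw [hBany]
      by_cases h0 : (hcnt l 0 K : Int) ≥ t
      · have hall : (List.range (l.length - K + 1)).any
            (fun j => decide ((hcnt l j K : Int) ≥ t)) = true := by
          rw [List.any_eq_true]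
          exact ⟨0, List.mem_range.mpr (by omega), by simpa using h0⟩
        rw [hall, if_pos h0]
      · rw [if_neg h0]
        have hmain := loopA_main l K t (l.length - K) 0 false (by omega)
        simp only [Nat.cast_zero, add_zero] at hmain
        rw [hmain, Bool.false_or]
        rw [show l.length - K + 1 = (l.length - K) + 1 from rfl, List.range_succ_eq_map]
        simp only [List.any_cons, List.any_map, Function.comp_def]
        rw [decide_eq_false (by simpa using h0), Bool.false_or]
        apply PySem.List.any_congr_mem
        intro d _
        simp [Nat.add_comm]
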